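-- pv_equiv track=rewrite | github.com/jqnag8/TUIA | Primer año/Programación I/Unidad 5/Ejercicio_13.py | notas_alumnos
-- ===== SOURCE A (Python) =====
-- def notas_alumnos(lista_alumnos: list[tuple[str, int]]) -> dict[str, list[int]]:
--     """
--     Función que devuelve un diccionario con los alumnos como claves y una lista de notas como valores.
--     """
--     dict_resultado = dict()
--
--     for alumno, nota in lista_alumnos:
--         if alumno in dict_resultado:
--             dict_resultado[alumno].append(nota)
--         else:
--             dict_resultado[alumno] = [nota]
--
--     return dict_resultado
-- ===== SOURCE B (Python) =====
-- def notas_alumnos(lista_alumnos: list[tuple[str, int]]) -> dict[str, list[int]]: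
--     claves = list(dict.fromkeys(alumno for alumno, _ in lista_alumnos))
--     return {k: [nota for alumno, nota in lista_alumnos if alumno == k] for k in claves}
-- ===== Notes on version B (the rewrite author's own statement) =====
-- stated objective: alternative
-- what changed: Replaces the single accumulating dict pass (conditional append/insert per entry) by a two-phase decomposition: first compute the first-occurrence-ordered distinct student list via dict.fromkeys, then build the result with a dict comprehension that collects each student's grades by a per-key scan of the input.
import Mathlib
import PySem

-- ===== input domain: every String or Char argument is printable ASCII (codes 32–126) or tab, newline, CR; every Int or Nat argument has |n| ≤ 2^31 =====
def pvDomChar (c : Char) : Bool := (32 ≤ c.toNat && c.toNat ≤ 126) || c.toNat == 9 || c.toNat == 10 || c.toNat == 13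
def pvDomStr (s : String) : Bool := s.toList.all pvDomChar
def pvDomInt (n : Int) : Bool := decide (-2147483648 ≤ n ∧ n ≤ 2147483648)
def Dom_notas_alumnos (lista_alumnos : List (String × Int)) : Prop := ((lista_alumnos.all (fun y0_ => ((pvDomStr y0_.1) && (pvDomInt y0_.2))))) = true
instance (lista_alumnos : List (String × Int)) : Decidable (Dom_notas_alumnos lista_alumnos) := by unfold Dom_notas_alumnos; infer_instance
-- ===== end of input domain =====

-- B replaces A's single accumulating dict pass by first-occurrence key extraction
-- followed by a per-key filtering comprehension (alternative decomposition; equal return value).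

-- ===== PORT A =====
-- for alumno, nota in lista: if alumno in d: d[alumno].append(nota) else: d[alumno] = [nota]
def notas_alumnos (lista_alumnos : List (String × Int)) : List (String × List Int) :=
  (lista_alumnos.foldl
    (fun d p =>
      if d.contains p.1 then d.modify p.1 [] (fun v => v ++ [p.2])
      else d.insert p.1 [p.2])
    PySem.Dict.empty).items

-- ===== PORT B =====
-- claves = list(dict.fromkeys(alumno for alumno,_ in lista)); {k: [n for a,n in lista if a==k] for k in claves}
def notas_alumnos_alt (lista_alumnos : List (String × Int)) : List (String × List Int) :=
  (PySem.List.dedup (lista_alumnos.map Prod.fst)).map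
    (fun k => (k, (lista_alumnos.filter (fun p => p.1 == k)).map Prod.snd))

-- ===== PRECONDITION & SPEC =====
def Spec_notas_alumnos (lista_alumnos : List (String × Int)) (out : List (String × List Int)) : Prop := out = notas_alumnos_alt lista_alumnos
instance (lista_alumnos : List (String × Int)) (out : List (String × List Int)) : Decidable (Spec_notas_alumnos lista_alumnos out) := by unfold Spec_notas_alumnos; infer_instance

-- ===== CLAIM (what is proved, stated in full; the proofs are below) =====
def Claim_equal_notas_alumnos : Prop := ∀ (lista_alumnos : List (String × Int)), Dom_notas_alumnos lista_alumnos → Spec_notas_alumnos lista_alumnos (notas_alumnos lista_alumnos)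

-- ===== LEMMAS AND PROOFS =====

-- A's if-contains step is exactly Dict.modify (modify is insert of f(getD), definitionally)
theorem nta_step_eq (d : PySem.Dict String (List Int)) (p : String × Int) :
    (if d.contains p.1 then d.modify p.1 [] (fun v => v ++ [p.2])
     else d.insert p.1 [p.2]) = d.modify p.1 [] (fun v => v ++ [p.2]) := by
  split_ifs with h
  · rfl
  · have hm : d.modify p.1 [] (fun v => v ++ [p.2])
        = d.insert p.1 ((d.getD p.1 []) ++ [p.2]) := PySem.Dict.ext_iff.mpr rfl
    rw [hm, PySem.Dict.getD_of_not_contains d [] (by simpa using h)]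
    simp

theorem nta_fold_eq (lista_alumnos : List (String × Int)) :
    lista_alumnos.foldl
      (fun d p =>
        if d.contains p.1 then d.modify p.1 [] (fun v => v ++ [p.2])
        else d.insert p.1 [p.2]) PySem.Dict.empty
    = lista_alumnos.foldl (fun d p => d.modify p.1 [] (fun v => v ++ [p.2]))
        PySem.Dict.empty := by
  simp only [nta_step_eq]

-- ===== VERDICT (by name: the statement is the Claim_ definition above) =====
theorem notas_alumnos_spec : Claim_equal_notas_alumnos := by
  intro l _
  unfold Spec_notas_alumnos notas_alumnos notas_alumnos_alt
  rw [nta_fold_eq]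
  set d := l.foldl (fun d p => d.modify p.1 [] (fun v => v ++ [p.2])) PySem.Dict.empty with hd
  have hkeys : d.keys = PySem.List.dedup (l.map Prod.fst) := by
    rw [hd, PySem.Dict.keys_foldl_modify_key]
    simp [PySem.List.dedup_eq_ofList, PySem.Set.update_nil_left, PySem.Dict.keys_empty]
  have hnd : d.keys.Nodup := by
    rw [hd]
    exact PySem.Dict.nodup_keys_foldl_modify_key l Prod.fst []
      (fun d p => fun v => v ++ [p.2]) PySem.Dict.empty PySem.Dict.nodup_keys_empty
  rw [PySem.Dict.items_eq_map_keys d hnd [], hkeys]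
  apply List.map_congr_left
  intro k _
  have := PySem.Dict.getD_foldl_modify_append (l := l) (d := PySem.Dict.empty) (c := k)
  simp only [PySem.Dict.getD_empty, List.nil_append] at this
  rw [← hd] at this
  rw [this]
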